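-- pv_equiv track=rewrite | github.com/fviscontiprasca/semiotic_labelling | scripts/03_yolo_segmenter.py | _categorize_urban_elements
-- ===== SOURCE A (Python) =====
-- from typing import Dict, List, Tuple, Optional, Any
--
-- def _categorize_urban_elements(classes: List[str]) -> Dict[str, List[str]]:
--     """Categorize detected elements by urban function."""
--
--     categories = {
--         "architectural_structures": [],
--         "infrastructure": [],
--         "mobility": [],
--         "vegetation": [],
--         "urban_furniture": [],
--         "human_activity": []
--     }
--
--     architectural = ["building", "house", "skyscraper", "tower", "castle", "office building"]
--     infrastructure = ["traffic light", "stop sign", "fire hydrant", "parking meter"]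
--     mobility = ["car", "truck", "bus", "bicycle", "motorcycle"]
--     vegetation = ["tree", "potted plant"]
--     furniture = ["bench", "cart", "fountain"]
--     human = ["person"]
--
--     for cls in classes:
--         if cls in architectural:
--             categories["architectural_structures"].append(cls)
--         elif cls in infrastructure:
--             categories["infrastructure"].append(cls)
--         elif cls in mobility:
--             categories["mobility"].append(cls)
--         elif cls in vegetation:
--             categories["vegetation"].append(cls)
--         elif cls in furniture:
--             categories["urban_furniture"].append(cls)
--         elif cls in human:
--             categories["human_activity"].append(cls)
--
--     return categories
-- ===== SOURCE B (Python) =====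
-- def _categorize_urban_elements(classes):
--     """Categorize detected elements by urban function (one filter pass per category)."""
--     groups = [
--         ("architectural_structures", ["building", "house", "skyscraper", "tower", "castle", "office building"]),
--         ("infrastructure", ["traffic light", "stop sign", "fire hydrant", "parking meter"]),
--         ("mobility", ["car", "truck", "bus", "bicycle", "motorcycle"]),
--         ("vegetation", ["tree", "potted plant"]),
--         ("urban_furniture", ["bench", "cart", "fountain"]),
--         ("human_activity", ["person"]),
--     ]
--     return {key: [c for c in classes if c in labels] for key, labels in groups}
-- ===== Notes on version B (the rewrite author's own statement) =====
-- stated objective: simpler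
-- what changed: Replaced the single bucketing loop with a six-way if/elif membership cascade by six independent filter passes, one comprehension per category; correct because the category label lists are pairwise disjoint.
import Mathlib
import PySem

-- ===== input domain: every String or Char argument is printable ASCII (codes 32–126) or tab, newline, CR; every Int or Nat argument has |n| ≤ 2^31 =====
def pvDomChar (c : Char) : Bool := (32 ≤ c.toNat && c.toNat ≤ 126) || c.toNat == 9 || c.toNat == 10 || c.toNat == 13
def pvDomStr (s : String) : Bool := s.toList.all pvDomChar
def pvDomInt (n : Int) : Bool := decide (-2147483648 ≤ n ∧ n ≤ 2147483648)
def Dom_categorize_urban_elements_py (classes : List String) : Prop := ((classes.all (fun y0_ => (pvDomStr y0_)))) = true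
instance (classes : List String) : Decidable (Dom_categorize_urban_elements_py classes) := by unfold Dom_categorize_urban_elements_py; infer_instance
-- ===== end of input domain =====

-- B replaces A's single bucketing loop (six-way if/elif membership cascade) by six independent
-- filter passes, one per category (objective: simpler; correct since the label lists are disjoint).

-- ===== PORT A =====
def pvCatsA : PySem.Dict String (List String) :=
  PySem.Dict.ofList [("architectural_structures", []), ("infrastructure", []), ("mobility", []),
    ("vegetation", []), ("urban_furniture", []), ("human_activity", [])]

def pvArchitectural : List String := ["building", "house", "skyscraper", "tower", "castle", "office building"]
def pvInfrastructure : List String := ["traffic light", "stop sign", "fire hydrant", "parking meter"]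
def pvMobility : List String := ["car", "truck", "bus", "bicycle", "motorcycle"]
def pvVegetation : List String := ["tree", "potted plant"]
def pvFurniture : List String := ["bench", "cart", "fountain"]
def pvHuman : List String := ["person"]

-- loop body of A: categories[key].append(cls) on an existing key = Dict.modify key [] (· ++ [cls])
def pvStepA (d : PySem.Dict String (List String)) (cls : String) : PySem.Dict String (List String) :=
  if cls ∈ pvArchitectural then d.modify "architectural_structures" [] (· ++ [cls])
  else if cls ∈ pvInfrastructure then d.modify "infrastructure" [] (· ++ [cls])
  else if cls ∈ pvMobility then d.modify "mobility" [] (· ++ [cls])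
  else if cls ∈ pvVegetation then d.modify "vegetation" [] (· ++ [cls])
  else if cls ∈ pvFurniture then d.modify "urban_furniture" [] (· ++ [cls])
  else if cls ∈ pvHuman then d.modify "human_activity" [] (· ++ [cls])
  else d

def categorize_urban_elements_py (classes : List String) : List (String × List String) :=
  (classes.foldl pvStepA pvCatsA).items

-- ===== PORT B =====
def pvGroups : List (String × List String) :=
  [("architectural_structures", pvArchitectural), ("infrastructure", pvInfrastructure),
   ("mobility", pvMobility), ("vegetation", pvVegetation),
   ("urban_furniture", pvFurniture), ("human_activity", pvHuman)]

def categorize_urban_elements_py_alt (classes : List String) : List (String × List String) :=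
  pvGroups.map (fun kv => (kv.1, classes.filter (fun c => c ∈ kv.2)))

-- ===== PRECONDITION & SPEC =====
def Spec_categorize_urban_elements_py (classes : List String) (out : List (String × List String)) : Prop := out = categorize_urban_elements_py_alt classes
instance (classes : List String) (out : List (String × List String)) : Decidable (Spec_categorize_urban_elements_py classes out) := by unfold Spec_categorize_urban_elements_py; infer_instance

-- ===== CLAIM (what is proved, stated in full; the proofs are below) =====
def Claim_equal_categorize_urban_elements_py : Prop := ∀ (classes : List String), Dom_categorize_urban_elements_py classes → Spec_categorize_urban_elements_py classes (categorize_urban_elements_py classes)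

-- ===== LEMMAS AND PROOFS =====

-- A's dict state always has the six fixed keys; pvD names that shape
def pvD (a b c d e f : List String) : PySem.Dict String (List String) :=
  PySem.Dict.ofList [("architectural_structures", a), ("infrastructure", b), ("mobility", c),
    ("vegetation", d), ("urban_furniture", e), ("human_activity", f)]

theorem pv_mod1 (a b c d e f g : List String) :
    (pvD a b c d e f).modify "architectural_structures" [] (· ++ g) = pvD (a ++ g) b c d e f := rfl
theorem pv_mod2 (a b c d e f g : List String) :
    (pvD a b c d e f).modify "infrastructure" [] (· ++ g) = pvD a (b ++ g) c d e f := rfl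
theorem pv_mod3 (a b c d e f g : List String) :
    (pvD a b c d e f).modify "mobility" [] (· ++ g) = pvD a b (c ++ g) d e f := rfl
theorem pv_mod4 (a b c d e f g : List String) :
    (pvD a b c d e f).modify "vegetation" [] (· ++ g) = pvD a b c (d ++ g) e f := rfl
theorem pv_mod5 (a b c d e f g : List String) :
    (pvD a b c d e f).modify "urban_furniture" [] (· ++ g) = pvD a b c d (e ++ g) f := rfl
theorem pv_mod6 (a b c d e f g : List String) :
    (pvD a b c d e f).modify "human_activity" [] (· ++ g) = pvD a b c d e (f ++ g) := rfl

-- invariant: folding A's loop over `classes` from state pvD a…f appends each category's filter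
theorem pv_fold_items : ∀ (classes a b c d e f : List String),
    ((classes.foldl pvStepA (pvD a b c d e f)).items) =
      [("architectural_structures", a ++ classes.filter (fun x => x ∈ pvArchitectural)),
       ("infrastructure", b ++ classes.filter (fun x => x ∈ pvInfrastructure)),
       ("mobility", c ++ classes.filter (fun x => x ∈ pvMobility)),
       ("vegetation", d ++ classes.filter (fun x => x ∈ pvVegetation)),
       ("urban_furniture", e ++ classes.filter (fun x => x ∈ pvFurniture)),
       ("human_activity", f ++ classes.filter (fun x => x ∈ pvHuman))] := by
  intro classes
  induction classes with
  | nil =>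
    intro a b c d e f
    simp only [List.foldl_nil, List.filter_nil, List.append_nil]
    rfl
  | cons cls rest ih =>
    intro a b c d e f
    by_cases h : cls ∈ ["building", "house", "skyscraper", "tower", "castle", "office building",
        "traffic light", "stop sign", "fire hydrant", "parking meter", "car", "truck", "bus",
        "bicycle", "motorcycle", "tree", "potted plant", "bench", "cart", "fountain", "person"]
    · simp only [List.mem_cons, List.not_mem_nil, or_false] at h
      rcases h with h | h | h | h | h | h | h | h | h | h | h | h | h | h | h | h | h | h | h | h | h <;>
        subst h <;>
        simp [List.foldl_cons, pvStepA, pv_mod1, pv_mod2, pv_mod3, pv_mod4, pv_mod5, pv_mod6, ih,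
          pvArchitectural, pvInfrastructure, pvMobility, pvVegetation,
          pvFurniture, pvHuman]
    · simp only [List.mem_cons, List.not_mem_nil, or_false, not_or] at h
      obtain ⟨h1, h2, h3, h4, h5, h6, h7, h8, h9, h10, h11, h12, h13, h14, h15, h16, h17, h18, h19, h20, h21⟩ := h
      have hstep : pvStepA (pvD a b c d e f) cls = pvD a b c d e f := by
        simp [pvStepA, pvArchitectural, pvInfrastructure, pvMobility, pvVegetation, pvFurniture,
          pvHuman, h1, h2, h3, h4, h5, h6, h7, h8, h9, h10, h11, h12, h13, h14, h15, h16, h17,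
          h18, h19, h20, h21]
      rw [List.foldl_cons, hstep, ih]
      simp [pvArchitectural, pvInfrastructure, pvMobility, pvVegetation,
        pvFurniture, pvHuman, h1, h2, h3, h4, h5, h6, h7, h8, h9, h10, h11, h12, h13, h14, h15,
        h16, h17, h18, h19, h20, h21]

-- ===== VERDICT (by name: the statement is the Claim_ definition above) =====
theorem categorize_urban_elements_py_spec : Claim_equal_categorize_urban_elements_py := by
  intro classes _
  unfold Spec_categorize_urban_elements_py categorize_urban_elements_py categorize_urban_elements_py_alt
  rw [show pvCatsA = pvD [] [] [] [] [] [] from rfl, pv_fold_items]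
  simp [pvGroups]
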